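-- pv_equiv track=rewrite | github.com/shigeoodvm-creator/FALCON | app/modules/milk_report_extras.py | _months_ending_at
-- ===== SOURCE A (Python) =====
-- from typing import Any, Callable, Dict, List, Optional, Tuple
--
-- def _months_ending_at(year: int, month: int, count: int = 5) -> List[Tuple[int, int]]:
--     cy, cm = year, month
--     rev: List[Tuple[int, int]] = []
--     for _ in range(count):
--         rev.append((cy, cm))
--         if cm == 1:
--             cy -= 1
--             cm = 12
--         else:
--             cm -= 1
--     rev.reverse()
--     return rev
-- ===== SOURCE B (Python) =====
-- def _months_ending_at(year, month, count=5):
--     idx = year * 12 + (month - 1)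
--     out = []
--     for i in range(count):
--         y, r = divmod(idx - count + 1 + i, 12)
--         out.append((y, r + 1))
--     return out
-- ===== Notes on version B (the rewrite author's own statement) =====
-- stated objective: simpler
-- what changed: Replaces the stateful backward walk with wrap branch plus a final reverse by a direct forward loop that computes each (year, month) in closed form from an absolute month index via divmod.
-- outside the precondition, e.g. on _months_ending_at(2020, 13, 2): A returns [(2020, 12), (2020, 13)], B returns [(2020, 12), (2021, 1)]
import Mathlib
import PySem

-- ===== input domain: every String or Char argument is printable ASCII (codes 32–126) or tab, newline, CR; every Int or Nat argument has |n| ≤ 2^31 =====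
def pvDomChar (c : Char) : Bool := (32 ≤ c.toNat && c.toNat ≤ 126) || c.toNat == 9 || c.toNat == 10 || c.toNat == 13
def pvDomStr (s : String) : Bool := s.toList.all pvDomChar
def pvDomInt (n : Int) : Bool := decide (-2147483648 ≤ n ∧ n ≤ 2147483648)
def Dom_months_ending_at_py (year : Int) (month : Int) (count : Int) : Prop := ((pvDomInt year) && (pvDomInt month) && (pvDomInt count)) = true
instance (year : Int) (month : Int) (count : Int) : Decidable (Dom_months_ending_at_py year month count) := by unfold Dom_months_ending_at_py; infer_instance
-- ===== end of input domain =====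

-- B replaces A's stateful backward walk (wrap branch + final reverse) by a forward loop
-- computing each pair in closed form via divmod on an absolute month index (objective: simpler).

-- ===== PORT A =====
-- the for-loop over range(count): state (cy, cm, rev), one constructor per iteration
def pvLoopA : Nat → Int × Int × List (Int × Int) → Int × Int × List (Int × Int)
  | 0, s => s
  | n + 1, (cy, cm, rev) =>
      let rev := rev ++ [(cy, cm)]
      if cm = 1 then pvLoopA n (cy - 1, 12, rev)
      else pvLoopA n (cy, cm - 1, rev)

def months_ending_at_py (year : Int) (month : Int) (count : Int) : List (Int × Int) :=
  (pvLoopA count.toNat (year, month, [])).2.2.reverse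

-- ===== PORT B =====
def months_ending_at_py_alt (year : Int) (month : Int) (count : Int) : List (Int × Int) :=
  let idx := year * 12 + (month - 1)
  (List.range count.toNat).map (fun (i : Nat) =>
    let k := idx - count + 1 + (i : Int)
    (PySem.Int.floordiv k 12, PySem.Int.mod k 12 + 1))

-- ===== PRECONDITION & SPEC =====
-- Pre_ excludes out-of-range months (month < 1 or month > 12) when count is positive: there A
-- emits raw non-calendar month numbers (its wrap fires only at cm == 1) while B's divmod yields
-- normalized calendar months; neither value is specified for such degenerate months.
def Pre_months_ending_at_py (year : Int) (month : Int) (count : Int) : Prop :=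
  (1 ≤ month ∧ month ≤ 12) ∨ count ≤ 0
instance (year : Int) (month : Int) (count : Int) : Decidable (Pre_months_ending_at_py year month count) := by unfold Pre_months_ending_at_py; infer_instance
def pvWitness_months_ending_at_py : Int × Int × Int := (2024, 2, 5)
def Spec_months_ending_at_py (year : Int) (month : Int) (count : Int) (out : List (Int × Int)) : Prop := out = months_ending_at_py_alt year month count
instance (year : Int) (month : Int) (count : Int) (out : List (Int × Int)) : Decidable (Spec_months_ending_at_py year month count out) := by unfold Spec_months_ending_at_py; infer_instance

-- ===== CLAIM (what is proved, stated in full; the proofs are below) =====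
def Claim_equal_months_ending_at_py : Prop := ∀ (year : Int) (month : Int) (count : Int), Dom_months_ending_at_py year month count → Pre_months_ending_at_py year month count → Spec_months_ending_at_py year month count (months_ending_at_py year month count)

-- ===== LEMMAS AND PROOFS =====

-- divmod of an in-range (year, month) index
theorem pvNorm12 (cy r : Int) (h1 : 0 ≤ r) (h2 : r < 12) :
    PySem.Int.floordiv (cy * 12 + r) 12 = cy ∧ PySem.Int.mod (cy * 12 + r) 12 = r := by
  rw [PySem.Int.floordiv_eq_ediv_of_pos (by norm_num), PySem.Int.mod_eq_emod_of_pos (by norm_num)]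
  omega

-- invariant of A's loop: the accumulated list is the closed-form sequence, backwards
theorem pvLoopA_spec (n : Nat) : ∀ (cy cm : Int) (rev : List (Int × Int)), 1 ≤ cm → cm ≤ 12 →
    (pvLoopA n (cy, cm, rev)).2.2 =
      rev ++ (List.range n).map (fun (j : Nat) =>
        (PySem.Int.floordiv (cy * 12 + cm - 1 - (j : Int)) 12,
         PySem.Int.mod (cy * 12 + cm - 1 - (j : Int)) 12 + 1)) := by
  induction n with
  | zero => intro cy cm rev _ _; simp [pvLoopA]
  | succ n ih =>
    intro cy cm rev h1 h2
    rw [List.range_succ_eq_map]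
    by_cases hc : cm = 1
    · subst hc
      show (pvLoopA n (cy - 1, 12, rev ++ [(cy, 1)])).2.2 = _
      rw [ih (cy - 1) 12 (rev ++ [(cy, 1)]) (by norm_num) (by norm_num)]
      have h0 := pvNorm12 cy 0 (by norm_num) (by norm_num)
      simp only [List.map_cons, List.map_map, List.append_assoc, List.cons_append,
        List.nil_append, Nat.cast_zero]
      congr 1
      congr 1
      · have e : cy * 12 + 1 - 1 - 0 = cy * 12 + 0 := by ring
        rw [e, h0.1, h0.2]; norm_num
      · apply List.map_congr_left
        intro j _
        simp only [Function.comp]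
        have e1 : (cy - 1) * 12 + 12 - 1 - (j : Int) = cy * 12 + 1 - 1 - ((j : Nat).succ : Int) := by
          push_cast; ring
        rw [e1]
    · simp only [pvLoopA]
      rw [if_neg hc]
      rw [ih cy (cm - 1) (rev ++ [(cy, cm)]) (by omega) (by omega)]
      have h0 := pvNorm12 cy (cm - 1) (by omega) (by omega)
      simp only [List.map_cons, List.map_map, List.append_assoc, List.cons_append,
        List.nil_append, Nat.cast_zero]
      congr 1
      congr 1
      · have e : cy * 12 + cm - 1 - 0 = cy * 12 + (cm - 1) := by ring
        rw [e, h0.1, h0.2]; congr 1; ring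
      · apply List.map_congr_left
        intro j _
        simp only [Function.comp]
        have e1 : cy * 12 + (cm - 1) - 1 - (j : Int) = cy * 12 + cm - 1 - ((j : Nat).succ : Int) := by
          push_cast; ring
        rw [e1]

-- ===== VERDICT (by name: the statement is the Claim_ definition above) =====
theorem months_ending_at_py_spec : Claim_equal_months_ending_at_py := by
  intro year month count _ hpre
  rcases hpre with ⟨h1, h2⟩ | hz
  case inr =>
    show _ = _
    unfold months_ending_at_py months_ending_at_py_alt
    have : count.toNat = 0 := by omega
    simp [this, pvLoopA]
  show _ = _
  unfold months_ending_at_py months_ending_at_py_alt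
  rw [pvLoopA_spec count.toNat year month [] h1 h2]
  simp only [List.nil_append]
  apply List.ext_getElem
  · simp
  · intro i hiL hiR
    simp only [List.length_reverse, List.length_map, List.length_range] at hiL hiR
    rw [List.getElem_reverse]
    simp only [List.getElem_map, List.getElem_range, List.length_map, List.length_range]
    have hcount : 0 < count := by
      by_contra h
      have : count.toNat = 0 := by omega
      omega
    have hcast : (↑(count.toNat - 1 - i) : Int) = count - 1 - (i : Int) := by
      omega
    have e : year * 12 + month - 1 - (↑(count.toNat - 1 - i) : Int)
        = year * 12 + (month - 1) - count + 1 + (i : Int) := by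
      rw [hcast]; ring
    rw [e]
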